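-- pv_equiv track=rewrite | github.com/ajinabraham/libsast | libsast/core_matcher/matchers.py | get_match_lines
-- ===== SOURCE A (Python) =====
-- def get_match_lines(content, pos):
--     """Get Match lines from position."""
--     start_line = 0
--     filepos = 0
--     skip = False
--     for idx, line in enumerate(content.split('\n'), 1):
--         filepos += len(line) + 1
--         if filepos >= pos[0] and filepos >= pos[1] and not skip:
--             # Match is on the same line
--             return (idx, idx)
--         elif filepos >= pos[0] and not skip:
--             # Multiline match, find start line
--             skip = True
--             start_line = idx
--         if filepos >= pos[1] and skip:
--             # Multiline march, find end line
--             return (start_line, idx)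
-- ===== SOURCE B (Python) =====
-- def get_match_lines(content, pos):
--     """Get Match lines from position."""
--     # Build the prefix table of cumulative character offsets (end of each line,
--     # counting the '\n'), then locate the two thresholds with binary search.
--     offsets = []
--     total = 0
--     for line in content.split('\n'):
--         total += len(line) + 1
--         offsets.append(total)
--     i = _bisect_left(offsets, pos[0])
--     if i == len(offsets):
--         return None
--     if offsets[i] >= pos[1]:
--         return (i + 1, i + 1)
--     j = _bisect_left(offsets, pos[1])
--     if j == len(offsets):
--         return None
--     return (i + 1, j + 1)
--
--
-- def _bisect_left(a, x):
--     lo, hi = 0, len(a)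
--     while lo < hi:
--         mid = (lo + hi) // 2
--         if a[mid] < x:
--             lo = mid + 1
--         else:
--             hi = mid
--     return lo
-- ===== Notes on version B (the rewrite author's own statement) =====
-- stated objective: alternative
-- what changed: Replaces the single stateful scan with a skip flag by a prefix-offset table plus two independent binary searches for the start and end thresholds.
import Mathlib
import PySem

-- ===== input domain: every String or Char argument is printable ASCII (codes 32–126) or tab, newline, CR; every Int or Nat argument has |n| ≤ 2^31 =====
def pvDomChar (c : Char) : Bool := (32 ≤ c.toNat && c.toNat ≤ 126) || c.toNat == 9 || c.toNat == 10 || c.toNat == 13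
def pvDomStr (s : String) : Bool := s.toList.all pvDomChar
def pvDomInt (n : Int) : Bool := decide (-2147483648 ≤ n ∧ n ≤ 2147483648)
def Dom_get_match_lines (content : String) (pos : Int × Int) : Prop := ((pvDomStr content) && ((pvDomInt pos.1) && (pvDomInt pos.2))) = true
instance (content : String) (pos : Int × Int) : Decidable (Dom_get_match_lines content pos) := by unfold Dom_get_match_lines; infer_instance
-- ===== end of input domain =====

-- B replaces A's single stateful scan (skip flag) by a prefix-offset table plus
-- two binary searches; same cost class, different algorithm (objective: alternative).

-- ===== PORT A =====
-- A's loop over enumerate(content.split('\n'), 1) with state (start_line, filepos, skip).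
def goA : List String → Int → Int → Int → Bool → Int × Int → Option (Int × Int)
  | [], _, _, _, _, _ => none
  | line :: rest, idx, filepos, start_line, skip, pos =>
    let fp := filepos + PySem.Str.len line + 1
    if pos.1 ≤ fp ∧ pos.2 ≤ fp ∧ skip = false then some (idx, idx)
    else if pos.1 ≤ fp ∧ skip = false then
      -- skip := true, start_line := idx; then the trailing `if filepos >= pos[1] and skip`
      if pos.2 ≤ fp then some (idx, idx)
      else goA rest (idx + 1) fp idx true pos
    else if pos.2 ≤ fp ∧ skip = true then some (start_line, idx)
    else goA rest (idx + 1) fp start_line skip pos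

-- content.split('\n'): split? with a nonempty separator is always `some`
def get_match_lines (content : String) (pos : Int × Int) : Option (Int × Int) :=
  goA ((PySem.Str.split? content "\n").getD []) 1 0 0 false pos

-- ===== PORT B =====
def prefixOffsets : List String → Int → List Int
  | [], _ => []
  | line :: rest, total =>
    (total + PySem.Str.len line + 1) :: prefixOffsets rest (total + PySem.Str.len line + 1)

-- hand-written bisect_left from Source B (while lo < hi: …)
def bisectGo (a : List Int) (x : Int) (lo hi : Nat) : Nat :=
  if _h : lo < hi then
    let mid := (lo + hi) / 2
    if a.getD mid 0 < x then bisectGo a x (mid + 1) hi else bisectGo a x lo mid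
  else lo
termination_by hi - lo
decreasing_by all_goals omega

def bisectLeft (a : List Int) (x : Int) : Nat := bisectGo a x 0 a.length

def get_match_lines_alt (content : String) (pos : Int × Int) : Option (Int × Int) :=
  let offs := prefixOffsets ((PySem.Str.split? content "\n").getD []) 0
  let i := bisectLeft offs pos.1
  if i = offs.length then none
  else if pos.2 ≤ offs.getD i 0 then some ((i : Int) + 1, (i : Int) + 1)
  else
    let j := bisectLeft offs pos.2
    if j = offs.length then none
    else some ((i : Int) + 1, (j : Int) + 1)

-- ===== PRECONDITION & SPEC =====
def Spec_get_match_lines (content : String) (pos : Int × Int) (out : Option (Int × Int)) : Prop := out = get_match_lines_alt content pos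
instance (content : String) (pos : Int × Int) (out : Option (Int × Int)) : Decidable (Spec_get_match_lines content pos out) := by unfold Spec_get_match_lines; infer_instance

-- ===== CLAIM (what is proved, stated in full; the proofs are below) =====
def Claim_equal_get_match_lines : Prop := ∀ (content : String) (pos : Int × Int), Dom_get_match_lines content pos → Spec_get_match_lines content pos (get_match_lines content pos)

-- ===== LEMMAS AND PROOFS =====

-- abbreviation used only in the proofs: first index with pos-threshold reached
def fidx (C : List Int) (x : Int) : Nat := C.findIdx (fun c => decide (x ≤ c))

-- the common characterization both ports are reduced to
def G (C : List Int) (pos : Int × Int) (idx : Int) : Option (Int × Int) :=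
  let i := fidx C pos.1
  if i = C.length then none
  else if pos.2 ≤ C.getD i 0 then some (idx + i, idx + i)
  else
    let j := fidx C pos.2
    if j = C.length then none
    else some (idx + i, idx + j)

lemma fidx_cons (a : Int) (C : List Int) (x : Int) :
    fidx (a :: C) x = if x ≤ a then 0 else fidx C x + 1 := by
  simp only [fidx, List.findIdx_cons]
  by_cases h : x ≤ a <;> simp [h]

lemma fidx_le_length (C : List Int) (x : Int) : fidx C x ≤ C.length :=
  List.findIdx_le_length

lemma fidx_pred (C : List Int) (x : Int) (h : fidx C x < C.length) :
    x ≤ C.getD (fidx C x) 0 := by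
  have := List.findIdx_getElem (w := h) (p := fun c => decide (x ≤ c)) (xs := C)
  simpa [List.getD_eq_getElem?_getD, List.getElem?_eq_getElem h] using this

lemma fidx_not_pred (C : List Int) (x : Int) (k : Nat) (hk : k < fidx C x) (hl : k < C.length) :
    ¬ x ≤ C.getD k 0 := by
  have := List.not_of_lt_findIdx (p := fun c => decide (x ≤ c)) (xs := C) hk
  simpa [List.getD_eq_getElem?_getD, List.getElem?_eq_getElem hl] using this

-- bisectGo computes fidx on a sorted list
lemma bisectGo_eq (C : List Int) (x : Int)
    (hs : ∀ k l : Nat, k ≤ l → l < C.length → C.getD k 0 ≤ C.getD l 0) :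
    ∀ lo hi : Nat, lo ≤ fidx C x → fidx C x ≤ hi → hi ≤ C.length →
      bisectGo C x lo hi = fidx C x := by
  intro lo hi
  induction hn : hi - lo using Nat.strong_induction_on generalizing lo hi with
  | _ n ih =>
    intro h1 h2 h3
    unfold bisectGo
    split_ifs with hlt
    · have hmid : (lo + hi) / 2 < hi := by omega
      have hmidlen : (lo + hi) / 2 < C.length := by omega
      by_cases hc : C.getD ((lo + hi) / 2) 0 < x
      · simp only [if_pos hc]
        have hgt : (lo + hi) / 2 < fidx C x := by
          by_contra hle
          have hflen : fidx C x < C.length := by omega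
          have := hs (fidx C x) ((lo + hi) / 2) (Nat.le_of_not_lt hle) hmidlen
          have := fidx_pred C x hflen
          omega
        exact ih (hi - ((lo + hi) / 2 + 1)) (by omega) _ _ rfl (by omega) h2 h3
      · simp only [if_neg hc]
        have hle : fidx C x ≤ (lo + hi) / 2 := by
          by_contra hgt
          have := fidx_not_pred C x ((lo + hi) / 2) (Nat.lt_of_not_le hgt) hmidlen
          omega
        exact ih ((lo + hi) / 2 - lo) (by omega) _ _ rfl h1 hle (by omega)
    · omega

-- prefix offsets: every entry is strictly above the accumulator
lemma prefixOffsets_pos (ls : List String) (acc : Int) :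
    ∀ y ∈ prefixOffsets ls acc, acc < y := by
  induction ls generalizing acc with
  | nil => simp [prefixOffsets]
  | cons l rest ih =>
    intro y hy
    simp only [prefixOffsets, List.mem_cons] at hy
    have hlen : (0 : Int) ≤ PySem.Str.len l := by simp [PySem.Str.len_eq]
    rcases hy with h | h
    · omega
    · have := ih (acc + PySem.Str.len l + 1) y h
      omega

lemma prefixOffsets_sorted (ls : List String) (acc : Int) :
    List.Pairwise (· ≤ ·) (prefixOffsets ls acc) := by
  induction ls generalizing acc with
  | nil => simp [prefixOffsets]
  | cons l rest ih =>
    simp only [prefixOffsets]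
    refine List.Pairwise.cons ?_ (ih _)
    intro y hy
    have := prefixOffsets_pos rest (acc + PySem.Str.len l + 1) y hy
    omega

lemma sorted_getD (C : List Int) (hp : List.Pairwise (· ≤ ·) C) :
    ∀ k l : Nat, k ≤ l → l < C.length → C.getD k 0 ≤ C.getD l 0 := by
  intro k l hkl hl
  rcases Nat.eq_or_lt_of_le hkl with rfl | hkl'
  · exact le_refl _
  · have hk : k < C.length := by omega
    have := (List.pairwise_iff_getElem (R := (· ≤ ·)) (l := C)).1 hp k l hk hl hkl'
    simpa [List.getD_eq_getElem?_getD, List.getElem?_eq_getElem hk, List.getElem?_eq_getElem hl]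
      using this

-- B's port equals the characterization G at idx = 1
lemma alt_eq_G (content : String) (pos : Int × Int) :
    get_match_lines_alt content pos = G (prefixOffsets ((PySem.Str.split? content "\n").getD []) 0) pos 1 := by
  have hs := sorted_getD _ (prefixOffsets_sorted ((PySem.Str.split? content "\n").getD []) 0)
  have hb : ∀ x : Int, bisectLeft (prefixOffsets ((PySem.Str.split? content "\n").getD []) 0) x
      = fidx (prefixOffsets ((PySem.Str.split? content "\n").getD []) 0) x := by
    intro x
    exact bisectGo_eq _ x hs 0 _ (Nat.zero_le _) (fidx_le_length _ _) (le_refl _)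
  simp only [get_match_lines_alt, G, hb]
  split_ifs <;> simp [Int.add_comm]

-- A's loop with skip = true: scan for the first offset reaching pos.2
lemma goA_skip (ls : List String) (pos : Int × Int) : ∀ (idx fp start : Int),
    goA ls idx fp start true pos =
      (let C := prefixOffsets ls fp
       let j := fidx C pos.2
       if j = C.length then none else some (start, idx + (j : Int))) := by
  induction ls with
  | nil => intro idx fp start; simp [goA, prefixOffsets, fidx]
  | cons l rest ih =>
    intro idx fp start
    simp only [goA, prefixOffsets, fidx_cons, PySem.Str.len_eq, List.length_cons]
    generalize fp + (l.toList.length : Int) + 1 = a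
    by_cases h2 : pos.2 ≤ a
    · simp [h2]
    · have hle := fidx_le_length (prefixOffsets rest a) pos.2
      simp only [ih]
      by_cases hj : fidx (prefixOffsets rest a) pos.2 = (prefixOffsets rest a).length
      · simp [h2, hj]
      · have hne : ¬ (fidx (prefixOffsets rest a) pos.2 + 1 = (prefixOffsets rest a).length + 1) := by
          omega
        simp [h2, hj, hne]
        omega

-- A's loop with skip = false equals G
lemma goA_eq_G (ls : List String) (pos : Int × Int) : ∀ (idx fp start : Int),
    goA ls idx fp start false pos = G (prefixOffsets ls fp) pos idx := by
  induction ls with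
  | nil => intro idx fp start; simp [goA, prefixOffsets, G, fidx]
  | cons l rest ih =>
    intro idx fp start
    simp only [goA, prefixOffsets, PySem.Str.len_eq]
    generalize fp + (l.toList.length : Int) + 1 = a
    by_cases h1 : pos.1 ≤ a
    · by_cases h2 : pos.2 ≤ a
      · simp [G, prefixOffsets, fidx_cons, h1, h2]
      · rw [goA_skip]
        have hle := fidx_le_length (prefixOffsets rest a) pos.2
        by_cases hj : fidx (prefixOffsets rest a) pos.2 = (prefixOffsets rest a).length
        · simp [G, prefixOffsets, fidx_cons, h1, h2, hj]
        · have hne : ¬ (fidx (prefixOffsets rest a) pos.2 + 1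
              = (prefixOffsets rest a).length + 1) := by omega
          simp [G, prefixOffsets, fidx_cons, h1, h2, hj, hne]
          omega
    · rw [ih]
      generalize hC' : prefixOffsets rest a = C'
      have hle := fidx_le_length C' pos.1
      by_cases hi : fidx C' pos.1 = C'.length
      · simp [G, prefixOffsets, fidx_cons, h1, hi, hC']
      · have hne : ¬ (fidx C' pos.1 + 1 = C'.length + 1) := by omega
        have hilen : fidx C' pos.1 < C'.length := by omega
        have hpred := fidx_pred C' pos.1 hilen
        simp only [List.getD_eq_getElem?_getD] at hpred
        by_cases h2i : pos.2 ≤ C'[fidx C' pos.1]?.getD 0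
        · simp [G, prefixOffsets, fidx_cons, h1, hi, hne, h2i, hC']
          omega
        · have h2a : ¬ pos.2 ≤ a := by
            have hmem : C'.getD (fidx C' pos.1) 0 ∈ C' := by
              rw [List.getD_eq_getElem _ _ hilen]
              exact List.getElem_mem _
            have := prefixOffsets_pos rest a _ (by rw [hC']; exact hmem)
            simp only [List.getD_eq_getElem?_getD] at this
            omega
          have hle2 := fidx_le_length C' pos.2
          by_cases hj : fidx C' pos.2 = C'.length
          · simp [G, prefixOffsets, fidx_cons, h1, hi, hne, h2i, h2a, hj, hC']
          · have hne2 : ¬ (fidx C' pos.2 + 1 = C'.length + 1) := by omega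
            simp [G, prefixOffsets, fidx_cons, h1, hi, hne, h2i, h2a, hj, hne2, hC']
            omega

-- ===== VERDICT (by name: the statement is the Claim_ definition above) =====
theorem get_match_lines_spec : Claim_equal_get_match_lines := by
  intro content pos _
  show get_match_lines content pos = get_match_lines_alt content pos
  rw [get_match_lines, goA_eq_G, alt_eq_G]
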